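-- pv_equiv track=rewrite | github.com/the-lost-mahiro/My-LeetCode-Portfolio | practice/4171-rotate-non-negative-elements/solution.py | rotateElements
-- ===== SOURCE A (Python) =====
-- from typing import List
--
-- def rotateElements(nums: List[int], k: int) -> List[int]:
--     idx = []
--     arr = []
--
--     for i, num in enumerate(nums):
--         if not num < 0:
--             idx.append(i)
--             arr.append(num)
--
--     n_arr = len(arr)
--     if n_arr <= 1:
--         return nums
--
--     k %= n_arr
--     arr = arr[k:] + arr[:k]
--
--     for i in range(n_arr):
--         nums[idx[i]] = arr[i]
--
--     return nums
-- ===== SOURCE B (Python) =====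
-- def rotateElements(nums, k):
--     # Three-reversal rotation: swap elements in place through the index list of
--     # non-negative slots (reverse first k, reverse the rest, reverse the whole);
--     # no value array is extracted and no slice/rebuild pass is made.
--     # Mutates nums in place, like A.
--     idx = [i for i, v in enumerate(nums) if v >= 0]
--     m = len(idx)
--     if m <= 1:
--         return nums
--     k %= m
--
--     def rev(lo, hi):
--         while lo < hi:
--             a, b = idx[lo], idx[hi]
--             nums[a], nums[b] = nums[b], nums[a]
--             lo += 1
--             hi -= 1
--
--     rev(0, k - 1)
--     rev(k, m - 1)
--     rev(0, m - 1)
--     return nums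
-- ===== Notes on version B (the rewrite author's own statement) =====
-- stated objective: alternative
-- what changed: Instead of extracting a value array, rotating it by slicing and writing it back, B rotates in place with the classic three-reversal technique: it keeps only the index list of non-negative slots and repeatedly swaps nums[idx[lo]] with nums[idx[hi]] (reverse first k, reverse the rest, reverse the whole subsequence).
import Mathlib
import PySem

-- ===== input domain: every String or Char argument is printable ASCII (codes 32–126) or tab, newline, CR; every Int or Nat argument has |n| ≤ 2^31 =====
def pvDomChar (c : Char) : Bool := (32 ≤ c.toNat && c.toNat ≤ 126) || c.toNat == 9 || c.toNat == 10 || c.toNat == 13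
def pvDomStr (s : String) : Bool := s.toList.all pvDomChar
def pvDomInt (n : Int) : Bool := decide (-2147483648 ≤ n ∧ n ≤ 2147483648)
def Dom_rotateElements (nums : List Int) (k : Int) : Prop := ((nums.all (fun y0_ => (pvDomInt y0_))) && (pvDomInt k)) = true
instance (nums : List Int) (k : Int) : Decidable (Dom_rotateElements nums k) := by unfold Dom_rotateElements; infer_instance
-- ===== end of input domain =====

-- B rotates with the three-reversal technique (in-place swaps through the index
-- list of non-negative slots) instead of A's extract-slice-write-back; both
-- mutate nums in place in Python, and the return value is what is proved equal.

-- ===== PORT A =====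
def rotateElements (nums : List Int) (k : Int) : List Int :=
  let p := (PySem.List.enumerate nums).foldl
    (fun (s : List Int × List Int) (iv : Int × Int) =>
      if ¬ iv.2 < 0 then (s.1 ++ [iv.1], s.2 ++ [iv.2]) else s) ([], [])
  let idx := p.1
  let arr := p.2
  let nArr : Int := (arr.length : Int)
  if nArr ≤ 1 then nums
  else
    let k1 := PySem.Int.mod k nArr
    let arr2 := PySem.List.slice arr (some k1) none ++ PySem.List.slice arr none (some k1)
    (PySem.List.pyRange 0 nArr 1).foldl
      (fun ns i => PySem.List.pySetD ns (PySem.List.pyGetD idx i 0) (PySem.List.pyGetD arr2 i 0)) nums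

-- ===== PORT B =====
/-- The `while lo < hi` swap loop of Source B's `rev` (indices always in range,
so `pyGetD`/`pySetD` are exact; the RHS tuple is read before both writes). -/
def revLoop (idx : List Int) (nums : List Int) (lo hi : Int) : List Int :=
  if lo < hi then
    let a := PySem.List.pyGetD idx lo 0
    let b := PySem.List.pyGetD idx hi 0
    let x := PySem.List.pyGetD nums b 0
    let y := PySem.List.pyGetD nums a 0
    revLoop idx (PySem.List.pySetD (PySem.List.pySetD nums a x) b y) (lo + 1) (hi - 1)
  else nums
termination_by (hi - lo).toNat
decreasing_by omega

def rotateElements_alt (nums : List Int) (k : Int) : List Int :=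
  let idx := (PySem.List.enumerate nums).filterMap
    (fun iv => if 0 ≤ iv.2 then some iv.1 else none)
  let m : Int := (idx.length : Int)
  if m ≤ 1 then nums
  else
    let k1 := PySem.Int.mod k m
    let nums1 := revLoop idx nums 0 (k1 - 1)
    let nums2 := revLoop idx nums1 k1 (m - 1)
    revLoop idx nums2 0 (m - 1)

-- ===== PRECONDITION & SPEC =====
def Spec_rotateElements (nums : List Int) (k : Int) (out : List Int) : Prop := out = rotateElements_alt nums k
instance (nums : List Int) (k : Int) (out : List Int) : Decidable (Spec_rotateElements nums k out) := by unfold Spec_rotateElements; infer_instance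

-- ===== CLAIM (what is proved, stated in full; the proofs are below) =====
def Claim_equal_rotateElements : Prop := ∀ (nums : List Int) (k : Int), Dom_rotateElements nums k → Spec_rotateElements nums k (rotateElements nums k)

-- ===== LEMMAS AND PROOFS =====

/-- Indices (from start `s`) of the non-negative entries of a list. -/
def nnIdx : List Int → Int → List Int
  | [], _ => []
  | x :: xs, s => if 0 ≤ x then s :: nnIdx xs (s + 1) else nnIdx xs (s + 1)

/-- Replace the non-negative entries of the first list, in order, by the
entries of the second list. -/
def repl : List Int → List Int → List Int
  | [], _ => []
  | x :: xs, r => if 0 ≤ x then r.headD 0 :: repl xs r.tail else x :: repl xs r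

/-- Pure model of the swap loop: reverse the segment `[lo, hi]` of a list. -/
def revSeg (ws : List Int) (lo hi : Int) : List Int :=
  if lo < hi then
    revSeg ((ws.set lo.toNat (ws.getD hi.toNat 0)).set hi.toNat (ws.getD lo.toNat 0))
      (lo + 1) (hi - 1)
  else ws
termination_by (hi - lo).toNat
decreasing_by omega

theorem enumFold (xs : List Int) : ∀ (s : Int) (i a : List Int),
    (PySem.List.enumerate xs s).foldl
      (fun (st : List Int × List Int) (iv : Int × Int) =>
        if ¬ iv.2 < 0 then (st.1 ++ [iv.1], st.2 ++ [iv.2]) else st) (i, a)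
    = (i ++ nnIdx xs s, a ++ xs.filter (fun x => decide (0 ≤ x))) := by
  induction xs with
  | nil => intro s i a; simp [nnIdx, PySem.List.enumerate]
  | cons x xs ih =>
    intro s i a
    rw [PySem.List.enumerate_cons]
    by_cases h : (0 : Int) ≤ x
    · simp only [List.foldl_cons, not_lt.2 h, not_false_iff, if_pos trivial]
      rw [ih]
      simp [nnIdx, h, List.filter_cons]
    · have h' : x < 0 := by omega
      simp only [List.foldl_cons, h']
      rw [if_neg (by simpa using h')]
      rw [ih]
      simp [nnIdx, h, h', List.filter_cons]

theorem idxB_eq (xs : List Int) : ∀ (s : Int),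
    (PySem.List.enumerate xs s).filterMap
      (fun iv => if 0 ≤ iv.2 then some iv.1 else none) = nnIdx xs s := by
  induction xs with
  | nil => intro s; simp [nnIdx, PySem.List.enumerate]
  | cons x xs ih =>
    intro s
    rw [PySem.List.enumerate_cons]
    by_cases h : (0 : Int) ≤ x <;> simp [nnIdx, h, ih]

theorem nnIdx_shift (xs : List Int) : ∀ (s : Int),
    nnIdx xs (s + 1) = (nnIdx xs s).map (· + 1) := by
  induction xs with
  | nil => intro s; simp [nnIdx]
  | cons x xs ih =>
    intro s
    by_cases h : (0 : Int) ≤ x <;> simp [nnIdx, h, ih]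

theorem nnIdx_length (xs : List Int) : ∀ (s : Int),
    (nnIdx xs s).length = (xs.filter (fun x => decide (0 ≤ x))).length := by
  induction xs with
  | nil => intro s; simp [nnIdx]
  | cons x xs ih =>
    intro s
    by_cases h : (0 : Int) ≤ x <;> simp [nnIdx, h, ih, List.filter_cons]

theorem nnIdx_nonneg (xs : List Int) : ∀ (s : Int), 0 ≤ s → ∀ y ∈ nnIdx xs s, 0 ≤ y := by
  induction xs with
  | nil => intro s _ y hy; simp [nnIdx] at hy
  | cons x xs ih =>
    intro s hs y hy
    by_cases h : (0 : Int) ≤ x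
    · simp [nnIdx, h] at hy
      rcases hy with rfl | hy
      · exact hs
      · exact ih (s + 1) (by omega) y hy
    · simp [nnIdx, h] at hy
      exact ih (s + 1) (by omega) y hy

theorem fold_shift (ps : List (Int × Int)) : ∀ (a : Int) (l : List Int),
    (∀ p ∈ ps, 0 ≤ p.1) →
    ps.foldl (fun ns p => PySem.List.pySetD ns (p.1 + 1) p.2) (a :: l)
      = a :: ps.foldl (fun ns p => PySem.List.pySetD ns p.1 p.2) l := by
  induction ps with
  | nil => intro a l _; simp
  | cons p ps ih =>
    intro a l hpos
    have h0 : 0 ≤ p.1 := hpos p (by simp)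
    simp only [List.foldl_cons]
    rw [PySem.List.pySetD_of_nonneg _ _ (by omega : (0:Int) ≤ p.1 + 1),
        PySem.List.pySetD_of_nonneg _ _ h0]
    have ht : (p.1 + 1).toNat = p.1.toNat + 1 := by omega
    rw [ht]
    simp only [List.set_cons_succ]
    exact ih a _ (fun q hq => hpos q (by simp [hq]))

theorem zipfold_repl (nums : List Int) : ∀ (rot : List Int),
    (nnIdx nums 0).length = rot.length →
    ((nnIdx nums 0).zip rot).foldl (fun ns p => PySem.List.pySetD ns p.1 p.2) nums
      = repl nums rot := by
  induction nums with
  | nil => intro rot _; simp [nnIdx, repl]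
  | cons x xs ih =>
    intro rot hlen
    by_cases h : (0 : Int) ≤ x
    · cases rot with
      | nil => simp [nnIdx, h] at hlen
      | cons v rot' =>
        simp only [nnIdx, h, if_pos, zero_add] at hlen ⊢
        have hz : ((0 : Int) :: nnIdx xs 1).zip (v :: rot')
            = (0, v) :: (nnIdx xs 1).zip rot' := by simp
        rw [hz]
        simp only [List.foldl_cons]
        rw [PySem.List.pySetD_of_nonneg _ _ (le_refl (0:Int))]
        simp only [Int.toNat_zero, List.set_cons_zero]
        have hsh : nnIdx xs 1 = (nnIdx xs 0).map (· + 1) := by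
          simpa using nnIdx_shift xs 0
        rw [hsh]
        have hzip : ((nnIdx xs 0).map (· + 1)).zip rot'
            = ((nnIdx xs 0).zip rot').map (fun p => (p.1 + 1, p.2)) := by
          rw [List.zip_map_left]
          rfl
        rw [hzip, List.foldl_map]
        have hpos : ∀ p ∈ (nnIdx xs 0).zip rot', 0 ≤ p.1 := by
          intro p hp
          exact nnIdx_nonneg xs 0 le_rfl p.1 (List.of_mem_zip hp).1
        rw [fold_shift _ v xs hpos]
        rw [ih rot' (by simpa [hsh] using hlen)]
        simp [repl, h]
    · simp only [nnIdx, h, if_false, zero_add] at hlen ⊢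
      have hsh : nnIdx xs 1 = (nnIdx xs 0).map (· + 1) := by
        simpa using nnIdx_shift xs 0
      rw [hsh]
      have hzip : ((nnIdx xs 0).map (· + 1)).zip rot
          = ((nnIdx xs 0).zip rot).map (fun p => (p.1 + 1, p.2)) := by
        rw [List.zip_map_left]; rfl
      rw [hzip, List.foldl_map]
      have hpos : ∀ p ∈ (nnIdx xs 0).zip rot, 0 ≤ p.1 := by
        intro p hp
        exact nnIdx_nonneg xs 0 le_rfl p.1 (List.of_mem_zip hp).1
      rw [fold_shift _ x xs hpos]
      rw [ih rot (by simpa [hsh] using hlen)]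
      simp [repl, h]

theorem rot_getD (vals : List Int) (kn j : Nat) (hj : j < vals.length)
    (hk : kn < vals.length) :
    (vals.drop kn ++ vals.take kn).getD j 0 = vals.getD ((j + kn) % vals.length) 0 := by
  have hdl : (vals.drop kn).length = vals.length - kn := by simp
  rw [List.getD_eq_getElem?_getD, List.getD_eq_getElem?_getD]
  by_cases hc : j < vals.length - kn
  · rw [List.getElem?_append_left (by omega), List.getElem?_drop]
    have : (j + kn) % vals.length = kn + j := by
      rw [Nat.mod_eq_of_lt (by omega)]; omega
    rw [this]
  · rw [List.getElem?_append_right (by omega), List.getElem?_take, hdl]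
    have h1 : j - (vals.length - kn) < kn := by omega
    rw [if_pos h1]
    have : (j + kn) % vals.length = j - (vals.length - kn) := by
      have h2 : j + kn - vals.length < vals.length := by omega
      rw [Nat.mod_eq_sub_mod (by omega), Nat.mod_eq_of_lt h2]
      omega
    rw [this]

theorem range_fold_eq_zipfold (idx rot : List Int) (nums : List Int)
    (hlen : idx.length = rot.length) :
    (PySem.List.pyRange 0 ((rot.length : Nat) : Int) 1).foldl
      (fun ns i => PySem.List.pySetD ns (PySem.List.pyGetD idx i 0) (PySem.List.pyGetD rot i 0)) nums
    = (idx.zip rot).foldl (fun ns p => PySem.List.pySetD ns p.1 p.2) nums := by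
  have hz : (idx.zip rot).length = rot.length := by
    rw [List.length_zip, hlen]; omega
  have hb : ((rot.length : Nat) : Int) = PySem.List.len (idx.zip rot) := by
    simp [PySem.List.len, hz]
  rw [hb]
  rw [PySem.List.foldl_congr_mem _ _
    (fun ns i => PySem.List.pySetD ns (PySem.List.pyGetD (idx.zip rot) i (0, 0)).1
        (PySem.List.pyGetD (idx.zip rot) i (0, 0)).2) nums ?_]
  · exact PySem.List.foldl_pyRange_zero_pyGetD (idx.zip rot) (0, 0)
      (fun ns p => PySem.List.pySetD ns p.1 p.2) nums
  · intro acc i hi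
    dsimp only
    rw [PySem.List.mem_pyRange_one] at hi
    have hi2 : i < ((idx.zip rot).length : Int) := by
      simpa [PySem.List.len] using hi.2
    rw [PySem.List.pyGetD_eq_getElem _ _ hi.1 hi2,
        PySem.List.pyGetD_eq_getElem _ _ hi.1 (by rw [hz] at hi2; omega : i < (idx.length : Int)),
        PySem.List.pyGetD_eq_getElem _ _ hi.1 (by rw [hz] at hi2; exact_mod_cast hi2),
        List.getElem_zip]

theorem repl_self (nums : List Int) :
    repl nums (nums.filter (fun x => decide (0 ≤ x))) = nums := by
  induction nums with
  | nil => rfl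
  | cons x xs ih =>
    by_cases h : (0 : Int) ≤ x <;> simp [repl, List.filter_cons, h, ih]

theorem getD_mem' (l : List Int) (j : Nat) (hj : j < l.length) : l.getD j 0 ∈ l := by
  rw [List.getD_eq_getElem?_getD, List.getElem?_eq_getElem hj, Option.getD_some]
  exact l.getElem_mem hj

theorem getD_set_self (l : List Int) (i : Nat) (a : Int) (h : i < l.length) :
    (l.set i a).getD i 0 = a := by
  simp [List.getD_eq_getElem?_getD, h]

theorem getD_set_ne (l : List Int) (i j : Nat) (a : Int) (h : i ≠ j) :
    (l.set i a).getD j 0 = l.getD j 0 := by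
  simp [List.getD_eq_getElem?_getD, List.getElem?_set_ne h]

theorem getRepl (nums : List Int) : ∀ (ws : List Int) (j : Nat),
    j < (nnIdx nums 0).length → ws.length = (nnIdx nums 0).length →
    PySem.List.pyGetD (repl nums ws) ((nnIdx nums 0).getD j 0) 0 = ws.getD j 0 := by
  induction nums with
  | nil => intro ws j hj _; simp [nnIdx] at hj
  | cons x xs ih =>
    intro ws j hj hw
    by_cases h : (0 : Int) ≤ x
    · simp only [nnIdx, h, if_pos, repl, zero_add] at hj hw ⊢
      have hsh : nnIdx xs 1 = (nnIdx xs 0).map (· + 1) := by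
        simpa using nnIdx_shift xs 0
      cases j with
      | zero =>
        have : PySem.List.pyGetD (ws.headD 0 :: repl xs ws.tail) ((0:Nat):Int) 0
            = ws.headD 0 := by
          rw [PySem.List.pyGetD_natCast]; simp
        simpa [List.headD_eq_head?_getD, List.getD_eq_getElem?_getD, List.head?_eq_getElem?]
          using this
      | succ j =>
        simp only [List.length_cons, Nat.add_lt_add_iff_right] at hj
        rw [hsh] at hj ⊢
        have hj' : j < (nnIdx xs 0).length := by simpa using hj
        rw [List.getD_cons_succ]
        have hmap : ((nnIdx xs 0).map (· + 1)).getD j 0 = (nnIdx xs 0).getD j 0 + 1 := by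
          rw [List.getD_eq_getElem?_getD, List.getD_eq_getElem?_getD,
            List.getElem?_map, List.getElem?_eq_getElem hj']
          simp
        rw [hmap]
        have he : (nnIdx xs 0).getD j 0 = (((nnIdx xs 0).getD j 0).toNat : Int) := by
          have := nnIdx_nonneg xs 0 le_rfl ((nnIdx xs 0).getD j 0)
            (getD_mem' _ _ hj')
          omega
        rw [he, show ((((nnIdx xs 0).getD j 0).toNat : Int) + 1)
              = (((((nnIdx xs 0).getD j 0).toNat + 1 : Nat)) : Int) by push_cast; ring,
            PySem.List.pyGetD_natCast]
        rw [List.getD_cons_succ, ← PySem.List.pyGetD_natCast, ← he]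
        cases ws with
        | nil => simp at hw
        | cons w wt =>
          simp only [List.tail_cons, List.getD_cons_succ]
          exact ih wt j hj' (by simp [hsh] at hw; omega)
    · simp only [nnIdx, h, if_false, repl, zero_add] at hj hw ⊢
      have hsh : nnIdx xs 1 = (nnIdx xs 0).map (· + 1) := by
        simpa using nnIdx_shift xs 0
      rw [hsh] at hj hw ⊢
      have hj' : j < (nnIdx xs 0).length := by simpa using hj
      have hmap : ((nnIdx xs 0).map (· + 1)).getD j 0 = (nnIdx xs 0).getD j 0 + 1 := by
        rw [List.getD_eq_getElem?_getD, List.getD_eq_getElem?_getD,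
          List.getElem?_map, List.getElem?_eq_getElem hj']
        simp
      rw [hmap]
      have he : (nnIdx xs 0).getD j 0 = (((nnIdx xs 0).getD j 0).toNat : Int) := by
        have := nnIdx_nonneg xs 0 le_rfl ((nnIdx xs 0).getD j 0) (getD_mem' _ _ hj')
        omega
      rw [he, show ((((nnIdx xs 0).getD j 0).toNat : Int) + 1)
            = (((((nnIdx xs 0).getD j 0).toNat + 1 : Nat)) : Int) by push_cast; ring,
          PySem.List.pyGetD_natCast]
      rw [List.getD_cons_succ, ← PySem.List.pyGetD_natCast, ← he]
      exact ih ws j hj' (by simpa using hw)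

theorem setRepl (nums : List Int) : ∀ (ws : List Int) (j : Nat) (v : Int),
    j < (nnIdx nums 0).length → ws.length = (nnIdx nums 0).length →
    PySem.List.pySetD (repl nums ws) ((nnIdx nums 0).getD j 0) v
      = repl nums (ws.set j v) := by
  induction nums with
  | nil => intro ws j v hj _; simp [nnIdx] at hj
  | cons x xs ih =>
    intro ws j v hj hw
    by_cases h : (0 : Int) ≤ x
    · simp only [nnIdx, h, if_pos, repl, zero_add] at hj hw ⊢
      have hsh : nnIdx xs 1 = (nnIdx xs 0).map (· + 1) := by
        simpa using nnIdx_shift xs 0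
      cases j with
      | zero =>
        rw [List.getD_cons_zero, PySem.List.pySetD_of_nonneg _ _ le_rfl]
        cases ws with
        | nil => simp at hw
        | cons w wt => simp
      | succ j =>
        simp only [List.length_cons, Nat.add_lt_add_iff_right] at hj
        rw [hsh] at hj ⊢
        have hj' : j < (nnIdx xs 0).length := by simpa using hj
        rw [List.getD_cons_succ]
        have hmap : ((nnIdx xs 0).map (· + 1)).getD j 0 = (nnIdx xs 0).getD j 0 + 1 := by
          rw [List.getD_eq_getElem?_getD, List.getD_eq_getElem?_getD,
            List.getElem?_map, List.getElem?_eq_getElem hj']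
          simp
        rw [hmap]
        have h0 : 0 ≤ (nnIdx xs 0).getD j 0 :=
          nnIdx_nonneg xs 0 le_rfl _ (getD_mem' _ _ hj')
        rw [PySem.List.pySetD_of_nonneg _ _ (by omega : (0:Int) ≤ (nnIdx xs 0).getD j 0 + 1)]
        have ht : ((nnIdx xs 0).getD j 0 + 1).toNat = ((nnIdx xs 0).getD j 0).toNat + 1 := by
          omega
        rw [ht, List.set_cons_succ]
        cases ws with
        | nil => simp at hw
        | cons w wt =>
          simp only [List.tail_cons, List.set_cons_succ, List.headD_cons]
          rw [← PySem.List.pySetD_of_nonneg _ _ h0, ih wt j v hj' (by simp [hsh] at hw; omega)]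
    · simp only [nnIdx, h, if_false, repl, zero_add] at hj hw ⊢
      have hsh : nnIdx xs 1 = (nnIdx xs 0).map (· + 1) := by
        simpa using nnIdx_shift xs 0
      rw [hsh] at hj hw ⊢
      have hj' : j < (nnIdx xs 0).length := by simpa using hj
      have hmap : ((nnIdx xs 0).map (· + 1)).getD j 0 = (nnIdx xs 0).getD j 0 + 1 := by
        rw [List.getD_eq_getElem?_getD, List.getD_eq_getElem?_getD,
          List.getElem?_map, List.getElem?_eq_getElem hj']
        simp
      rw [hmap]
      have h0 : 0 ≤ (nnIdx xs 0).getD j 0 :=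
        nnIdx_nonneg xs 0 le_rfl _ (getD_mem' _ _ hj')
      rw [PySem.List.pySetD_of_nonneg _ _ (by omega : (0:Int) ≤ (nnIdx xs 0).getD j 0 + 1)]
      have ht : ((nnIdx xs 0).getD j 0 + 1).toNat = ((nnIdx xs 0).getD j 0).toNat + 1 := by
        omega
      rw [ht, List.set_cons_succ]
      rw [← PySem.List.pySetD_of_nonneg _ _ h0, ih ws j v hj' (by simp at hw; omega)]

theorem revSeg_length (ws : List Int) (lo hi : Int) :
    (revSeg ws lo hi).length = ws.length := by
  induction ws, lo, hi using revSeg.induct with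
  | case1 ws lo hi h ih =>
    rw [revSeg, if_pos h]
    simpa using ih
  | case2 ws lo hi h =>
    rw [revSeg, if_neg h]

theorem revSeg_getD (ws : List Int) (lo hi : Int) (h0 : 0 ≤ lo)
    (hh : hi < (ws.length : Int)) : ∀ (j : Nat), j < ws.length →
    (revSeg ws lo hi).getD j 0
      = if lo ≤ (j : Int) ∧ (j : Int) ≤ hi then ws.getD (lo + hi - j).toNat 0
        else ws.getD j 0 := by
  induction ws, lo, hi using revSeg.induct with
  | case2 ws lo hi h =>
    intro j hj
    rw [revSeg, if_neg h]
    split_ifs with hc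
    · have : (lo + hi - (j:Int)).toNat = j := by omega
      rw [this]
    · rfl
  | case1 ws lo hi h ih =>
    intro j hj
    rw [revSeg, if_pos h]
    set ws' := (ws.set lo.toNat (ws.getD hi.toNat 0)).set hi.toNat (ws.getD lo.toNat 0)
      with hws'
    have hlen' : ws'.length = ws.length := by simp [hws']
    have hlolt : lo.toNat < ws.length := by omega
    have hhilt : hi.toNat < ws.length := by omega
    have hne : lo.toNat ≠ hi.toNat := by omega
    rw [ih (by omega) (by rw [hlen']; omega) j (by omega)]
    have hget : ∀ (n : Nat), n < ws.length →
        ws'.getD n 0 = if n = hi.toNat then ws.getD lo.toNat 0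
          else if n = lo.toNat then ws.getD hi.toNat 0 else ws.getD n 0 := by
      intro n hn
      by_cases e1 : n = hi.toNat
      · rw [if_pos e1, hws', e1, getD_set_self _ _ _ (by simpa using hhilt)]
      · rw [if_neg e1, hws', getD_set_ne _ _ _ _ (by omega)]
        by_cases e2 : n = lo.toNat
        · rw [if_pos e2, e2, getD_set_self _ _ _ hlolt]
        · rw [if_neg e2, getD_set_ne _ _ _ _ (by omega)]
    by_cases hin : lo + 1 ≤ (j : Int) ∧ (j : Int) ≤ hi - 1
    · rw [if_pos hin]
      have hm : (lo + 1 + (hi - 1) - (j:Int)).toNat = (lo + hi - (j:Int)).toNat := by omega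
      rw [hm]
      have hmn : (lo + hi - (j:Int)).toNat < ws.length := by omega
      rw [hget _ hmn, if_neg (by omega), if_neg (by omega),
        if_pos ⟨by omega, by omega⟩]
    · rw [if_neg hin]
      by_cases hj1 : (j : Int) = lo
      · rw [hget j hj, if_neg (by omega), if_pos (by omega),
          if_pos ⟨by omega, by omega⟩]
        congr 1
        omega
      · by_cases hj2 : (j : Int) = hi
        · rw [hget j hj, if_pos (by omega), if_pos ⟨by omega, by omega⟩]
          congr 1
          omega
        · rw [hget j hj, if_neg (by omega), if_neg (by omega),
            if_neg (by omega)]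

theorem revLoop_repl (nums : List Int) : ∀ (lo hi : Int) (ws : List Int),
    0 ≤ lo → hi < (ws.length : Int) → ws.length = (nnIdx nums 0).length →
    revLoop (nnIdx nums 0) (repl nums ws) lo hi = repl nums (revSeg ws lo hi) := by
  intro lo hi
  induction hn : (hi - lo).toNat using Nat.strong_induction_on generalizing lo hi with
  | _ n ihn =>
    intro ws h0 hh hw
    by_cases h : lo < hi
    · rw [revLoop, if_pos h, revSeg, if_pos h]
      dsimp only
      have hlo : lo.toNat < (nnIdx nums 0).length := by omega
      have hhi : hi.toNat < (nnIdx nums 0).length := by omega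
      have hcl : lo = ((lo.toNat : Nat) : Int) := by omega
      have hch : hi = ((hi.toNat : Nat) : Int) := by omega
      rw [hcl, hch, PySem.List.pyGetD_natCast, PySem.List.pyGetD_natCast,
        ← hcl, ← hch]
      rw [getRepl nums ws hi.toNat hhi hw, getRepl nums ws lo.toNat hlo hw]
      rw [setRepl nums ws lo.toNat _ hlo hw,
        setRepl nums _ hi.toNat _ hhi (by simpa using hw)]
      exact ihn ((hi - 1) - (lo + 1)).toNat (by omega) (lo + 1) (hi - 1) rfl _
        (by omega) (by simp; omega) (by simpa using hw)
    · rw [revLoop, if_neg h, revSeg, if_neg h]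

theorem getD_ext (l1 l2 : List Int) (hl : l1.length = l2.length)
    (h : ∀ j, j < l1.length → l1.getD j 0 = l2.getD j 0) : l1 = l2 := by
  apply List.ext_getElem hl
  intro j hj1 hj2
  have := h j hj1
  simpa [List.getD_eq_getElem?_getD, List.getElem?_eq_getElem, hj1, hj2] using this

theorem triple_rev (ws : List Int) (kn : Nat) (hk : kn < ws.length) :
    revSeg (revSeg (revSeg ws 0 ((kn : Int) - 1)) (kn : Int) ((ws.length : Int) - 1)) 0
      ((ws.length : Int) - 1)
    = ws.drop kn ++ ws.take kn := by
  set m := ws.length with hm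
  have hm0 : 0 < m := by omega
  set ws1 := revSeg ws 0 ((kn : Int) - 1) with hws1
  set ws2 := revSeg ws1 (kn : Int) ((m : Int) - 1) with hws2
  have hl1 : ws1.length = m := by rw [hws1, revSeg_length]
  have hl2 : ws2.length = m := by rw [hws2, revSeg_length, hl1]
  apply getD_ext
  · rw [revSeg_length, hl2]; simp [hm]; omega
  · intro j hj
    rw [revSeg_length, hl2] at hj
    rw [rot_getD ws kn j hj hk]
    rw [revSeg_getD ws2 0 ((m : Int) - 1) le_rfl (by omega) j (by omega)]
    rw [if_pos ⟨by omega, by omega⟩]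
    have hi1 : ((0 : Int) + ((m : Int) - 1) - j).toNat = m - 1 - j := by omega
    rw [hi1]
    rw [hws2, revSeg_getD ws1 (kn : Int) ((m : Int) - 1) (by omega) (by omega) _ (by omega)]
    by_cases hc : j < m - kn
    · -- m-1-j ≥ kn : inner branch taken
      rw [if_pos ⟨by omega, by omega⟩]
      have hi2 : ((kn : Int) + ((m : Int) - 1) - ((m - 1 - j : Nat) : Int)).toNat
          = kn + j := by omega
      rw [hi2, hws1,
        revSeg_getD ws 0 ((kn : Int) - 1) le_rfl (by omega) _ (by omega),
        if_neg (by omega)]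
      rw [show (j + kn) % ws.length = kn + j by
        rw [Nat.mod_eq_of_lt (by omega)]; omega]
    · rw [if_neg (by omega)]
      rw [hws1, revSeg_getD ws 0 ((kn : Int) - 1) le_rfl (by omega) _ (by omega),
        if_pos ⟨by omega, by omega⟩]
      have hi3 : ((0 : Int) + ((kn : Int) - 1) - ((m - 1 - j : Nat) : Int)).toNat
          = j + kn - m := by omega
      rw [hi3]
      rw [show (j + kn) % ws.length = j + kn - m by
        rw [Nat.mod_eq_sub_mod (by omega), Nat.mod_eq_of_lt (by omega)]]

-- ===== VERDICT (by name: the statement is the Claim_ definition above) =====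
theorem rotateElements_spec : Claim_equal_rotateElements := by
  unfold Claim_equal_rotateElements Spec_rotateElements
  intro nums k _
  simp only [rotateElements, rotateElements_alt]
  rw [enumFold nums 0 [] [], idxB_eq nums 0]
  simp only [List.nil_append]
  set vals := nums.filter (fun x => decide (0 ≤ x)) with hvals
  have hleq : (nnIdx nums 0).length = vals.length := nnIdx_length nums 0
  rw [hleq]
  split_ifs with hm
  · rfl
  · have hm1 : 1 < vals.length := by
      by_contra hc
      exact hm (by omega)
    have hmpos : (0 : Int) < (vals.length : Int) := by exact_mod_cast (by omega : 0 < vals.length)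
    have hk0 : 0 ≤ PySem.Int.mod k (vals.length : Int) := PySem.Int.mod_nonneg k hmpos
    set kn := (PySem.Int.mod k (vals.length : Int)).toNat with hkndef
    have hk1 : PySem.Int.mod k (vals.length : Int) = (kn : Int) :=
      (Int.toNat_of_nonneg hk0).symm
    have hknlt : kn < vals.length := by
      have := PySem.Int.mod_lt k hmpos
      omega
    rw [hk1, PySem.List.slice_from_natCast, PySem.List.slice_to_natCast]
    -- B side: three revLoops
    have e1 : revLoop (nnIdx nums 0) nums 0 ((kn : Int) - 1)
        = repl nums (revSeg vals 0 ((kn : Int) - 1)) := by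
      have h := revLoop_repl nums 0 ((kn : Int) - 1) vals (le_refl 0)
        (by omega) (by omega)
      rw [hvals, repl_self, ← hvals] at h
      exact h
    have e2 := revLoop_repl nums (kn : Int) ((vals.length : Int) - 1)
      (revSeg vals 0 ((kn : Int) - 1)) (by omega)
      (by rw [revSeg_length]; omega) (by rw [revSeg_length]; omega)
    have e3 := revLoop_repl nums 0 ((vals.length : Int) - 1)
      (revSeg (revSeg vals 0 ((kn : Int) - 1)) (kn : Int) ((vals.length : Int) - 1))
      (le_refl 0)
      (by rw [revSeg_length, revSeg_length]; omega)
      (by rw [revSeg_length, revSeg_length]; omega)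
    rw [e1, e2, e3, triple_rev vals kn hknlt]
    -- A side: repl nums (rotated vals)
    have hrotlen : (vals.drop kn ++ vals.take kn).length = vals.length := by
      simp; omega
    have hlen : (nnIdx nums 0).length = (vals.drop kn ++ vals.take kn).length := by
      rw [hrotlen]; exact hleq
    rw [show ((vals.length : Nat) : Int)
          = (((vals.drop kn ++ vals.take kn).length : Nat) : Int) by rw [hrotlen]]
    rw [range_fold_eq_zipfold _ _ _ hlen, zipfold_repl nums _ hlen]
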